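-- pv_equiv track=rewrite | github.com/hyun06000/AIL | reference-impl/ail/authoring.py | _unescape_json_string
-- ===== SOURCE A (Python) =====
-- def _unescape_json_string(s: str) -> str:
--     """Apply the standard JSON escape sequences to a raw extracted
--     value. Handles \\n, \\t, \\r, \\", \\\\, \\/. Unknown escapes pass
--     through literally (preserving the backslash), which is safer than
--     dropping characters when the value contains shell-style escapes
--     the model used incorrectly.
--     """
--     out: list[str] = []
--     i = 0
--     mapping = {
--         'n': '\n', 't': '\t', 'r': '\r',
--         '"': '"', '\\': '\\', '/': '/',
--     }
--     while i < len(s):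
--         c = s[i]
--         if c == '\\' and i + 1 < len(s) and s[i + 1] in mapping:
--             out.append(mapping[s[i + 1]])
--             i += 2
--         else:
--             out.append(c)
--             i += 1
--     return "".join(out)
-- ===== SOURCE B (Python) =====
-- def _unescape_json_string(s: str) -> str:
--     """One-pass state machine: a boolean escape flag instead of
--     index lookahead; unknown escapes re-emit the backslash, a trailing lone
--     backslash is flushed at the end."""
--     mapping = {
--         'n': '\n', 't': '\t', 'r': '\r',
--         '"': '"', '\\': '\\', '/': '/',
--     }
--     out: list[str] = []
--     pending = False
--     for c in s:
--         if pending: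
--             out.append(mapping.get(c, '\\' + c))
--             pending = False
--         elif c == '\\':
--             pending = True
--         else:
--             out.append(c)
--     if pending:
--         out.append('\\')
--     return "".join(out)
-- ===== Notes on version B (the rewrite author's own statement) =====
-- stated objective: alternative
-- what changed: Replaces A's index-based while loop with one-character lookahead and i+=2 stepping by a single for-loop state machine carrying a boolean escape flag, flushing a trailing lone backslash after the loop.
import Mathlib
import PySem

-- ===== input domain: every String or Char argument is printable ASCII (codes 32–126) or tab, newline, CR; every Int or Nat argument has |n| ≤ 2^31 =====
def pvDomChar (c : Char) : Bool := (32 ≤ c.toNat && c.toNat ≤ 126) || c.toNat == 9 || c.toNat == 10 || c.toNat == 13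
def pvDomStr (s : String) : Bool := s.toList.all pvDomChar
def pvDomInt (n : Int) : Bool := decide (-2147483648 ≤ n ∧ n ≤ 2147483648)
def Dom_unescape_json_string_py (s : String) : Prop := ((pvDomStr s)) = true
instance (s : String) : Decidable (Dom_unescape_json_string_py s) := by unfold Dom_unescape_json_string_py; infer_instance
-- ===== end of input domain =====

-- B replaces A's index loop with two-step lookahead by a one-pass fold carrying a
-- 'pending backslash' flag (objective: alternative decomposition, same cost).


-- ===== PORT A =====
-- the six-entry escape mapping of A
def pvMapA : PySem.Dict Char Char :=
  (((((PySem.Dict.empty.insert 'n' '\n').insert 't' '\t').insert 'r' '\r').insert '"' '"').insert '\\' '\\').insert '/' '/'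

-- A's while loop: index i, lookahead s[i+1], advancing by 2 on a recognized escape
def unescLoopA (cs : List Char) (i : Nat) (out : List Char) : List Char :=
  if _h : i < cs.length then
    let c := cs.getD i ' '
    if c = '\\' ∧ i + 1 < cs.length ∧ pvMapA.contains (cs.getD (i + 1) ' ') then
      unescLoopA cs (i + 2) (out ++ [(pvMapA.get? (cs.getD (i + 1) ' ')).getD ' '])
    else
      unescLoopA cs (i + 1) (out ++ [c])
  else out
termination_by cs.length - i

def unescape_json_string_py (s : String) : String :=
  String.ofList (unescLoopA s.toList 0 [])

-- ===== PORT B =====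
-- B's per-character step (same six-entry mapping literal, shared as pvMapA): state = (output so far, pending-backslash flag)
def unescStepB (st : List Char × Bool) (c : Char) : List Char × Bool :=
  if st.2 then
    (st.1 ++ (((pvMapA.get? c).map (fun v => [v])).getD ['\\', c]), false)
  else if c = '\\' then
    (st.1, true)
  else
    (st.1 ++ [c], false)

def unescape_json_string_py_alt (s : String) : String :=
  let st := s.toList.foldl unescStepB ([], false)
  String.ofList (if st.2 then st.1 ++ ['\\'] else st.1)

-- ===== PRECONDITION & SPEC =====
def Spec_unescape_json_string_py (s : String) (out : String) : Prop := out = unescape_json_string_py_alt s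
instance (s : String) (out : String) : Decidable (Spec_unescape_json_string_py s out) := by unfold Spec_unescape_json_string_py; infer_instance

-- ===== CLAIM (what is proved, stated in full; the proofs are below) =====
def Claim_equal_unescape_json_string_py : Prop := ∀ (s : String), Dom_unescape_json_string_py s → Spec_unescape_json_string_py s (unescape_json_string_py s)

-- ===== LEMMAS AND PROOFS =====

-- canonical recursive description of the unescaped output
def canonU : List Char → List Char
  | [] => []
  | [c] => [c]
  | c :: d :: t =>
    if c = '\\' ∧ pvMapA.contains d then (pvMapA.get? d).getD ' ' :: canonU t
    else c :: canonU (d :: t)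

lemma unescLoopA_eq_canon_aux (cs : List Char) (n i : Nat) (out : List Char)
    (hn : cs.length - i ≤ n) (hi : i ≤ cs.length) :
    unescLoopA cs i out = out ++ canonU (cs.drop i) := by
  induction n generalizing i out with
  | zero =>
    have : i = cs.length := by omega
    subst this
    rw [unescLoopA]
    simp [canonU]
  | succ n ih =>
    rcases Nat.lt_or_ge i cs.length with hlt | hge
    case inr =>
      have : i = cs.length := by omega
      subst this
      rw [unescLoopA]
      simp [canonU]
    have hdrop : cs.drop i = cs[i] :: cs.drop (i + 1) := List.drop_eq_getElem_cons hlt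
    have hget : cs.getD i ' ' = cs[i] := by
      simp [List.getD, List.getElem?_eq_getElem hlt]
    rw [unescLoopA]
    simp only [hlt, dif_pos, hget]
    by_cases hc : cs[i] = '\\' ∧ i + 1 < cs.length ∧ pvMapA.contains (cs.getD (i + 1) ' ')
    · obtain ⟨hbs, hlt2, hmem⟩ := hc
      have hget2 : cs.getD (i + 1) ' ' = cs[i + 1] := by
        simp [List.getD, List.getElem?_eq_getElem hlt2]
      have hdrop2 : cs.drop (i + 1) = cs[i + 1] :: cs.drop (i + 2) := List.drop_eq_getElem_cons hlt2
      rw [if_pos ⟨hbs, hlt2, hmem⟩, ih _ _ (by omega) (by omega)]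
      rw [hdrop, hdrop2, hget2]
      rw [hget2] at hmem
      simp [canonU, hbs, hmem]
    · rw [if_neg hc, ih _ _ (by omega) (by omega), hdrop]
      rcases Nat.lt_or_ge (i + 1) cs.length with h2 | h2
      · have hdrop2 : cs.drop (i + 1) = cs[i + 1] :: cs.drop (i + 2) := List.drop_eq_getElem_cons h2
        have hget2 : cs.getD (i + 1) ' ' = cs[i + 1] := by
          simp [List.getD, List.getElem?_eq_getElem h2]
        have hnc : ¬ (cs[i] = '\\' ∧ pvMapA.contains cs[i + 1]) := by
          intro ⟨ha, hb⟩; exact hc ⟨ha, h2, by rw [hget2]; exact hb⟩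
        rw [hdrop2]
        simp [canonU, hnc, ← hdrop2]
      · have : cs.drop (i + 1) = [] := List.drop_eq_nil_of_le h2
        rw [this]
        simp [canonU]

lemma not_contains_ne_bs (c : Char) (h : pvMapA.contains c = false) : c ≠ '\\' := by
  intro he; subst he; exact absurd h (by decide)

lemma foldB_eq_canon (t : List Char) :
    (∀ out : List Char,
      (let st := t.foldl unescStepB (out, false)
       if st.2 then st.1 ++ ['\\'] else st.1) = out ++ canonU t) ∧
    (∀ out : List Char,
      (let st := t.foldl unescStepB (out, true)
       if st.2 then st.1 ++ ['\\'] else st.1) = out ++ canonU ('\\' :: t)) := by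
  induction t with
  | nil => constructor <;> intro out <;> simp [canonU]
  | cons c t ih =>
    constructor
    · intro out
      by_cases hc : c = '\\'
      · subst hc
        simpa [List.foldl_cons, unescStepB] using ih.2 out
      · have h1 : canonU (c :: t) = c :: canonU t := by
          cases t with
          | nil => simp [canonU]
          | cons d t' => simp [canonU, hc]
        simpa [List.foldl_cons, unescStepB, hc, h1] using ih.1 (out ++ [c])
    · intro out
      cases hg : pvMapA.get? c with
      | some v =>
        have hct : pvMapA.contains c = true := by
          rcases h : pvMapA.contains c with _ | _
          · rw [(PySem.Dict.get?_eq_none_iff_contains pvMapA c).2 h] at hg; cases hg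
          · rfl
        have h1 : canonU ('\\' :: c :: t) = v :: canonU t := by
          simp [canonU, hct, hg]
        simpa [List.foldl_cons, unescStepB, hg, h1] using ih.1 (out ++ [v])
      | none =>
        have hct : pvMapA.contains c = false :=
          (PySem.Dict.get?_eq_none_iff_contains pvMapA c).1 hg
        have hcb : c ≠ '\\' := not_contains_ne_bs c hct
        have h1 : canonU ('\\' :: c :: t) = '\\' :: canonU (c :: t) := by
          simp [canonU, hct]
        have h2 : canonU (c :: t) = c :: canonU t := by
          cases t with
          | nil => simp [canonU]
          | cons d t' => simp [canonU, hcb]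
        simpa [List.foldl_cons, unescStepB, hg, h1, h2] using ih.1 (out ++ ['\\', c])

-- ===== VERDICT (by name: the statement is the Claim_ definition above) =====
lemma unescLoopA_eq_canon (cs : List Char) (i : Nat) (out : List Char) (hi : i ≤ cs.length) :
    unescLoopA cs i out = out ++ canonU (cs.drop i) :=
  unescLoopA_eq_canon_aux cs (cs.length - i) i out le_rfl hi

theorem unescape_json_string_py_spec : Claim_equal_unescape_json_string_py := by
  intro s _
  show unescape_json_string_py s = unescape_json_string_py_alt s
  rw [unescape_json_string_py, unescape_json_string_py_alt,
    unescLoopA_eq_canon s.toList 0 [] (Nat.zero_le _)]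
  have := (foldB_eq_canon s.toList).1 []
  simp only at this
  rw [this]
  simp
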